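-- pv_equiv track=rewrite | github.com/kannix68/advent_of_code_2019 | day04/day04a.py | is_pw
-- ===== SOURCE A (Python) =====
-- def is_pw(innum):
--   seq_found = False
--   last_dig = -1
--   for dig in map(int, str(innum)):
--     if not seq_found and dig == last_dig:
--       seq_found = True
--     if dig < last_dig:
--       return False
--     last_dig = dig
--   return seq_found
-- ===== SOURCE B (Python) =====
-- def is_pw(innum):
--   digits = [int(c) for c in str(innum)]
--   return digits == sorted(digits) and any(a == b for a, b in zip(digits, digits[1:]))
-- ===== Notes on version B (the rewrite author's own statement) =====
-- stated objective: simpler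
-- what changed: Replaces A's fused stateful scan (seq_found flag + last_dig sentinel with early return) by building the digit list once and checking two separate properties: digits == sorted(digits) and any adjacent equal pair via zip.
import Mathlib
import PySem

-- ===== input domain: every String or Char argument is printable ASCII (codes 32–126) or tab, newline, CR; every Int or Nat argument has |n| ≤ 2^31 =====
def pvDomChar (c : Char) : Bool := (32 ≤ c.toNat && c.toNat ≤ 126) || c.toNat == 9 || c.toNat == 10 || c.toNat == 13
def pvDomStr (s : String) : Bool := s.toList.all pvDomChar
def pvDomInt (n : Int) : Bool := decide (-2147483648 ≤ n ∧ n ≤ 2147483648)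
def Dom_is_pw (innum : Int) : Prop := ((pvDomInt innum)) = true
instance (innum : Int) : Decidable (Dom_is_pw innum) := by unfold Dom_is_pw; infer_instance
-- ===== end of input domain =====

-- B builds the digit list once and checks "already sorted" plus "any adjacent equal pair"
-- instead of A's fused stateful scan; objective: simpler.


-- ===== PORT A =====
-- map(int, str(innum)): under Pre_ (0 ≤ innum) every char of str(innum) is a digit
-- '0'..'9', on which int(c) = ord(c) - 48 exactly; for innum < 0 Python raises ValueError
-- at int('-'), excluded by Pre_.
def pyDigits (innum : Int) : List Int :=
  (PySem.Int.toChars innum).map (fun c => ((c.toNat : Int) - 48))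

-- the for-loop over (seq_found, last_dig) with its early `return False`
def isPwLoop : List Int → Bool → Int → Bool
  | [], seq_found, _ => seq_found
  | dig :: rest, seq_found, last_dig =>
    let seq_found' := if !seq_found && dig == last_dig then true else seq_found
    if dig < last_dig then false else isPwLoop rest seq_found' dig

def is_pw (innum : Int) : Bool :=
  isPwLoop (pyDigits innum) false (-1)

-- ===== PORT B =====
def is_pw_alt (innum : Int) : Bool :=
  let digits := (PySem.Int.toChars innum).map (fun c => ((c.toNat : Int) - 48))
  decide (digits = PySem.List.sorted digits (fun x => x) false)
    && (digits.zip digits.tail).any (fun p => p.1 == p.2)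

-- ===== PRECONDITION & SPEC =====
-- Pre_ excludes exactly the negative inputs, where A (and B alike) raises ValueError at int('-').
def Pre_is_pw (innum : Int) : Prop := 0 ≤ innum
instance (innum : Int) : Decidable (Pre_is_pw innum) := by unfold Pre_is_pw; infer_instance
def pvWitness_is_pw : Int := 122345
def Spec_is_pw (innum : Int) (out : Bool) : Prop := out = is_pw_alt innum
instance (innum : Int) (out : Bool) : Decidable (Spec_is_pw innum out) := by unfold Spec_is_pw; infer_instance

-- ===== CLAIM (what is proved, stated in full; the proofs are below) =====
def Claim_equal_is_pw : Prop := ∀ (innum : Int), Dom_is_pw innum → Pre_is_pw innum → Spec_is_pw innum (is_pw innum)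

-- ===== LEMMAS AND PROOFS =====

-- every character produced by Nat.toDigits 10 is '0'..'9'
theorem digitChar_bound (m : Nat) (hm : m < 10) :
    48 ≤ (Nat.digitChar m).toNat ∧ (Nat.digitChar m).toNat ≤ 57 := by
  interval_cases m <;> decide

theorem toDigitsCore_bound (f : Nat) : ∀ (n : Nat) (acc : List Char),
    (∀ c ∈ acc, 48 ≤ c.toNat ∧ c.toNat ≤ 57) →
    ∀ c ∈ Nat.toDigitsCore 10 f n acc, 48 ≤ c.toNat ∧ c.toNat ≤ 57 := by
  induction f with
  | zero => intro n acc hacc c hc; exact hacc c hc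
  | succ f ih =>
    intro n acc hacc c hc
    simp only [Nat.toDigitsCore] at hc
    split at hc
    · rcases List.mem_cons.mp hc with h | h
      · subst h; exact digitChar_bound _ (Nat.mod_lt _ (by norm_num))
      · exact hacc c h
    · exact ih _ _ (by
        intro d hd
        rcases List.mem_cons.mp hd with h | h
        · subst h; exact digitChar_bound _ (Nat.mod_lt _ (by norm_num))
        · exact hacc d h) c hc

theorem pyDigits_nonneg (innum : Int) (h : 0 ≤ innum) :
    ∀ d ∈ pyDigits innum, 0 ≤ d := by
  intro d hd
  simp only [pyDigits, List.mem_map] at hd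
  obtain ⟨c, hc, rfl⟩ := hd
  have hch : c ∈ Nat.toDigits 10 innum.toNat := by
    simpa [PySem.Int.toChars, Int.not_lt.mpr h] using hc
  have := toDigitsCore_bound _ _ _ (by simp) c hch
  omega

-- invariant of A's loop: sorted-chain from last_dig AND (flag OR an adjacent equality from last_dig)
def nondecFrom (last : Int) : List Int → Bool
  | [] => true
  | d :: r => decide (last ≤ d) && nondecFrom d r

def hasEqFrom (last : Int) : List Int → Bool
  | [] => false
  | d :: r => (d == last) || hasEqFrom d r

theorem isPwLoop_eq (ds : List Int) : ∀ (s : Bool) (last : Int),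
    isPwLoop ds s last = (nondecFrom last ds && (s || hasEqFrom last ds)) := by
  induction ds with
  | nil => intro s last; simp [isPwLoop, nondecFrom, hasEqFrom]
  | cons d r ih =>
    intro s last
    simp only [isPwLoop, nondecFrom, hasEqFrom]
    by_cases hlt : d < last
    · simp [hlt, Int.not_le.mpr hlt]
    · have hle : last ≤ d := Int.not_lt.mp hlt
      rw [if_neg hlt, ih]
      have hs : (if !s && d == last then true else s) = (s || d == last) := by
        cases s <;> cases hb : (d == last) <;> simp_all
      rw [hs]
      cases s <;> cases hb : (d == last) <;> simp_all

theorem nondecFrom_iff (ds : List Int) : ∀ (last : Int),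
    nondecFrom last ds = true ↔ List.IsChain (· ≤ ·) (last :: ds) := by
  induction ds with
  | nil => intro last; simp [nondecFrom]
  | cons d r ih => intro last; simp [nondecFrom, List.isChain_cons_cons, ih]

theorem hasEqFrom_eq_zip (ds : List Int) : ∀ (last : Int),
    hasEqFrom last ds = ((last :: ds).zip ds).any (fun p => p.1 == p.2) := by
  induction ds with
  | nil => intro last; simp [hasEqFrom]
  | cons d r ih =>
    intro last
    simp only [hasEqFrom, List.zip_cons_cons, List.any_cons, ih]
    have : (d == last) = (last == d) := by
      cases hb : (d == last) <;> cases hb' : (last == d) <;> simp_all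
    rw [this]

theorem sorted_self_iff_pairwise (ds : List Int) :
    ds = PySem.List.sorted ds (fun x => x) false ↔ List.Pairwise (· ≤ ·) ds := by
  constructor
  · intro h
    rw [h]
    exact PySem.List.sorted_pairwise ds (fun x => x)
  · intro h
    exact (PySem.List.sorted_eq_self_of_pairwise ds (fun x => x) h).symm

-- A = B over any nonnegative digit list
theorem key_eq (ds : List Int) (hnn : ∀ d ∈ ds, 0 ≤ d) :
    isPwLoop ds false (-1)
      = (decide (ds = PySem.List.sorted ds (fun x => x) false)
          && (ds.zip ds.tail).any (fun p => p.1 == p.2)) := by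
  rw [isPwLoop_eq, Bool.false_or]
  have h1 : nondecFrom (-1) ds = decide (ds = PySem.List.sorted ds (fun x => x) false) := by
    rw [Bool.eq_iff_iff, decide_eq_true_iff, nondecFrom_iff, sorted_self_iff_pairwise,
        List.isChain_iff_pairwise, List.pairwise_cons]
    constructor
    · exact fun h => h.2
    · intro h
      exact ⟨fun d hd => le_trans (by norm_num) (hnn d hd), h⟩
  have h2 : hasEqFrom (-1) ds = (ds.zip ds.tail).any (fun p => p.1 == p.2) := by
    cases ds with
    | nil => simp [hasEqFrom]
    | cons d0 r =>
      have hd0 : (0 : Int) ≤ d0 := hnn d0 (by simp)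
      have hne : (d0 == (-1 : Int)) = false := by
        simp only [beq_eq_false_iff_ne, ne_eq]
        omega
      simp only [hasEqFrom, hne, Bool.false_or, List.tail_cons]
      rw [hasEqFrom_eq_zip]
  rw [h1, h2]

-- ===== VERDICT (by name: the statement is the Claim_ definition above) =====
theorem is_pw_spec : Claim_equal_is_pw := by
  intro innum _ hpre
  have hnn := pyDigits_nonneg innum hpre
  simp only [pyDigits] at hnn
  unfold Spec_is_pw is_pw is_pw_alt pyDigits
  exact key_eq _ hnn
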